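-- pv_equiv track=rewrite | github.com/FSE-554/FSE-554 | RQ3/cul_N_patched.py | is_secure_answer
-- ===== SOURCE A (Python) =====
-- def is_secure_answer(answer_text: str) -> bool:
--     if not isinstance(answer_text, str):
--         return False
--     lines = [ln.replace("\r", "") for ln in answer_text.split("\n")]
--     last_idx = -1
--     for i, ln in enumerate(lines):
--         if ln.strip() == "# Answer:":
--             last_idx = i
--     if last_idx < 0 or last_idx + 1 >= len(lines):
--         return False
--     return lines[last_idx + 1].strip() == "Secure"
-- ===== SOURCE B (Python) =====
-- def is_secure_answer(answer_text: str) -> bool: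
--     if not isinstance(answer_text, str):
--         return False
--     stripped = [ln.replace("\r", "").strip() for ln in answer_text.split("\n")]
--     if stripped[-1] == "# Answer:":
--         return False
--     follows = [nxt for prev, nxt in zip(stripped, stripped[1:]) if prev == "# Answer:"]
--     return bool(follows) and follows[-1] == "Secure"
-- ===== Notes on version B (the rewrite author's own statement) =====
-- stated objective: alternative
-- what changed: B strips all lines up front, rejects a marker-final text immediately, then pairs each line with its successor via zip, filters the successors of '# Answer:' lines, and tests whether the last collected successor is 'Secure' -- no index tracking or index arithmetic at all.
import Mathlib
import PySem

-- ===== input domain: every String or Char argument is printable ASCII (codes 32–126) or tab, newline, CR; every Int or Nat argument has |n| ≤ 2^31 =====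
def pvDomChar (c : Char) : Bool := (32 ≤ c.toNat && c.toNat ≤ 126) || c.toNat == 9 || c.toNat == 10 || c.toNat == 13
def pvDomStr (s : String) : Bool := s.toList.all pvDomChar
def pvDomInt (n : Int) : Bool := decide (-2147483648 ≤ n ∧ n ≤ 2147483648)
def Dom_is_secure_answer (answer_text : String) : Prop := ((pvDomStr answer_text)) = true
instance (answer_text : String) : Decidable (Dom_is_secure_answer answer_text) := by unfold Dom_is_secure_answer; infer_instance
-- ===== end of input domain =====

-- B strips all lines once, rejects a marker-final text immediately, then pairs each line with
-- its successor via zip, filters successors of marker lines and tests the last collected one;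
-- no index tracking or index arithmetic — an alternative decomposition of the same cost class.

-- ===== PORT A =====
def is_secure_answer (answer_text : String) : Bool :=
  let lines := (PySem.Chars.splitOn answer_text.toList ['\n']).map
    (fun ln => PySem.Chars.replace ln ['\r'] [])
  let last_idx : Int :=
    lines.zipIdx.foldl
      (fun acc p => if PySem.Chars.strip p.1 == "# Answer:".toList then (p.2 : Int) else acc) (-1)
  if last_idx < 0 ∨ (lines.length : Int) ≤ last_idx + 1 then false
  else PySem.Chars.strip ((PySem.List.pyGet? lines (last_idx + 1)).getD []) == "Secure".toList

-- ===== PORT B =====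
def is_secure_answer_alt (answer_text : String) : Bool :=
  let stripped := (PySem.Chars.splitOn answer_text.toList ['\n']).map
    (fun ln => PySem.Chars.strip (PySem.Chars.replace ln ['\r'] []))
  -- stripped[-1]: split always yields a nonempty list, so pyGet? is exact here
  if (PySem.List.pyGet? stripped (-1)).getD [] == "# Answer:".toList then false
  else
    let follows := ((stripped.zip stripped.tail).filter
      (fun p => p.1 == "# Answer:".toList)).map Prod.snd
    !follows.isEmpty && (PySem.List.pyGet? follows (-1)).getD [] == "Secure".toList

-- ===== PRECONDITION & SPEC =====
def Spec_is_secure_answer (answer_text : String) (out : Bool) : Prop := out = is_secure_answer_alt answer_text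
instance (answer_text : String) (out : Bool) : Decidable (Spec_is_secure_answer answer_text out) := by unfold Spec_is_secure_answer; infer_instance

-- ===== CLAIM (what is proved, stated in full; the proofs are below) =====
def Claim_equal_is_secure_answer : Prop := ∀ (answer_text : String), Dom_is_secure_answer answer_text → Spec_is_secure_answer answer_text (is_secure_answer answer_text)

-- ===== LEMMAS AND PROOFS =====

def lastIdx (M : List Char) (l : List (List Char)) : Option Nat :=
  match l with
  | [] => none
  | x :: xs =>
    match lastIdx M xs with
    | some j => some (j + 1)
    | none => if x == M then some 0 else none

theorem lastIdx_lt_length (M : List Char) (l : List (List Char)) (j : Nat)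
    (h : lastIdx M l = some j) : j < l.length := by
  induction l generalizing j with
  | nil => simp [lastIdx] at h
  | cons x xs ih =>
    simp only [lastIdx] at h
    cases hxs : lastIdx M xs with
    | some j' =>
      rw [hxs] at h
      simp only [Option.some.injEq] at h
      have := ih j' hxs
      simp only [List.length_cons]; omega
    | none =>
      rw [hxs] at h
      simp only [List.length_cons]
      split_ifs at h with hx
      simp only [Option.some.injEq] at h; omega

theorem lastIdx_get (M : List Char) (l : List (List Char)) (j : Nat)
    (h : lastIdx M l = some j) : l.getD j [] = M := by
  induction l generalizing j with
  | nil => simp [lastIdx] at h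
  | cons x xs ih =>
    simp only [lastIdx] at h
    cases hxs : lastIdx M xs with
    | some j' =>
      rw [hxs] at h
      simp only [Option.some.injEq] at h
      subst h
      simpa using ih j' hxs
    | none =>
      rw [hxs] at h
      split_ifs at h with hx
      simp only [Option.some.injEq] at h
      subst h
      simpa using hx

theorem lastIdx_getLast (M : List Char) (l : List (List Char))
    (h : l.getLast? = some M) : lastIdx M l = some (l.length - 1) := by
  induction l with
  | nil => simp at h
  | cons x xs ih =>
    cases xs with
    | nil =>
      simp only [List.getLast?_singleton, Option.some.injEq] at h
      subst h
      simp [lastIdx]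
    | cons y ys =>
      have h' : (y :: ys).getLast? = some M := by
        rw [← h]; simp [List.getLast?_cons_cons]
      have ihh := ih h'
      show (match lastIdx M (y :: ys) with
            | some j => some (j + 1)
            | none => if x == M then some 0 else none) = some ((x :: y :: ys).length - 1)
      rw [ihh]
      simp

theorem getLast?_cons_ne_nil {α} (a : α) (l : List α) (h : l ≠ []) :
    (a :: l).getLast? = l.getLast? := by
  cases l with
  | nil => exact absurd rfl h
  | cons b bs => exact List.getLast?_cons_cons ..

theorem foldl_lastIdx (M : List Char) (l : List (List Char)) (k : Nat) (acc : Int) :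
    (l.zipIdx k).foldl
      (fun acc p => if PySem.Chars.strip p.1 == M then (p.2 : Int) else acc) acc
      = (lastIdx M (l.map PySem.Chars.strip)).elim acc (fun j => ((k + j : Nat) : Int)) := by
  induction l generalizing k acc with
  | nil => simp [lastIdx]
  | cons x xs ih =>
    simp only [List.zipIdx_cons, List.foldl_cons, List.map_cons, lastIdx]
    rw [ih]
    cases hxs : lastIdx M (xs.map PySem.Chars.strip) with
    | some j => simp only [Option.elim]; norm_num; omega
    | none =>
      by_cases hx : PySem.Chars.strip x = M
      · simp [hx]
      · simp [hx]

theorem follows_getLast (M : List Char) (l : List (List Char)) (h : l.getLast? ≠ some M) :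
    (((l.zip l.tail).filter (fun p => p.1 == M)).map Prod.snd).getLast?
      = (lastIdx M l).map (fun j => l.getD (j + 1) []) := by
  induction l with
  | nil => simp [lastIdx]
  | cons x xs ih =>
    cases xs with
    | nil =>
      simp only [List.getLast?_singleton, ne_eq, Option.some.injEq] at h
      simp [lastIdx, h]
    | cons y ys =>
      have htail : (y :: ys).getLast? ≠ some M := by
        rw [← List.getLast?_cons_cons]; exact h
      have ihy := ih htail
      show ((((x, y) :: (y :: ys).zip ((y :: ys).tail)).filter (fun p => p.1 == M)).map Prod.snd).getLast?
            = (match lastIdx M (y :: ys) with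
              | some j => some (j + 1)
              | none => if x == M then some 0 else none).map
                (fun j => (x :: y :: ys).getD (j + 1) [])
      rw [List.filter_cons]
      cases hxs : lastIdx M (y :: ys) with
      | some j =>
        rw [hxs] at ihy
        simp only [Option.map_some] at ihy ⊢
        have hfne : (((y :: ys).zip ((y :: ys).tail)).filter (fun p => p.1 == M)).map Prod.snd ≠ [] := by
          intro hc; rw [hc] at ihy; simp at ihy
        have hfne' : ((y :: ys).zip ((y :: ys).tail)).filter (fun p => p.1 == M) ≠ [] := by
          intro hc; apply hfne; rw [hc]; rfl
        have hgoal : ((y :: ys).getD (j + 1) []) = (x :: y :: ys).getD (j + 1 + 1) [] := by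
          simp
        by_cases hx : (x == M) = true
        · rw [if_pos hx, List.map_cons, getLast?_cons_ne_nil _ _ hfne, ihy, hgoal]
        · rw [if_neg hx, ihy, hgoal]
      | none =>
        rw [hxs] at ihy
        simp only [Option.map_none] at ihy
        have hemp : ((y :: ys).zip ((y :: ys).tail)).filter (fun p => p.1 == M) = [] := by
          cases hf : ((y :: ys).zip ((y :: ys).tail)).filter (fun p => p.1 == M) with
          | nil => rfl
          | cons a as =>
            rw [hf, List.map_cons] at ihy
            rcases List.getLast?_eq_none_iff.mp ihy with h2
            cases h2
        rw [hemp]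
        by_cases hx : (x == M) = true
        · rw [if_pos hx]; simp [eq_of_beq hx]
        · rw [if_neg hx]; simp; simpa using hx

theorem core_eq (M S : List Char) (hM : M ≠ []) (lines : List (List Char)) :
    (if ((lines.zipIdx.foldl
          (fun acc p => if PySem.Chars.strip p.1 == M then (p.2 : Int) else acc) (-1)) < 0
        ∨ (lines.length : Int) ≤ (lines.zipIdx.foldl
          (fun acc p => if PySem.Chars.strip p.1 == M then (p.2 : Int) else acc) (-1)) + 1)
      then false
      else PySem.Chars.strip ((PySem.List.pyGet? lines
        ((lines.zipIdx.foldl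
          (fun acc p => if PySem.Chars.strip p.1 == M then (p.2 : Int) else acc) (-1)) + 1)).getD [])
          == S)
      = (if (PySem.List.pyGet? (lines.map PySem.Chars.strip) (-1)).getD [] == M then false
        else
          !((((lines.map PySem.Chars.strip).zip (lines.map PySem.Chars.strip).tail).filter
              (fun p => p.1 == M)).map Prod.snd).isEmpty
            && (PySem.List.pyGet? ((((lines.map PySem.Chars.strip).zip
                  (lines.map PySem.Chars.strip).tail).filter (fun p => p.1 == M)).map Prod.snd)
                (-1)).getD [] == S) := by
  have hfold := foldl_lastIdx M lines 0 (-1)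
  rw [hfold]
  set str := lines.map PySem.Chars.strip with hstr
  have hlen : str.length = lines.length := by simp [hstr]
  rw [PySem.List.pyGet?_neg_one, PySem.List.pyGet?_neg_one]
  cases hlast : str.getLast? with
  | none =>
    have hstrnil : str = [] := List.getLast?_eq_none_iff.mp hlast
    rw [hstrnil]
    have h0 : lastIdx M ([] : List (List Char)) = none := rfl
    have hMne : (([] : List Char) == M) = false := by
      cases M with
      | nil => exact absurd rfl hM
      | cons c cs => rfl
    rw [h0]
    simp [hMne]
  | some last =>
    have hstrne : str ≠ [] := by intro hc; rw [hc] at hlast; simp at hlast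
    have hlen1 : 0 < str.length := List.length_pos_of_ne_nil hstrne
    by_cases hm : last = M
    · subst hm
      rw [lastIdx_getLast _ str hlast]
      simp only [Option.elim, Option.getD_some, beq_self_eq_true, if_true]
      have hcond : ((0 + (str.length - 1) : Nat) : Int) < 0 ∨
          (lines.length : Int) ≤ ((0 + (str.length - 1) : Nat) : Int) + 1 := by
        right; omega
      rw [if_pos hcond]
    · have hlastne : str.getLast? ≠ some M := by rw [hlast]; simp [hm]
      have hfl := follows_getLast M str hlastne
      simp only [Option.getD_some]
      rw [if_neg (show ¬((last == M) = true) by simp [hm])]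
      cases hj : lastIdx M str with
      | none =>
        rw [hj] at hfl
        simp only [Option.map_none] at hfl
        have hemp : (((str.zip str.tail).filter (fun p => p.1 == M)).map Prod.snd) = [] :=
          List.getLast?_eq_none_iff.mp hfl
        simp [hemp]
      | some j =>
        have hjlt : j < str.length := lastIdx_lt_length M str j hj
        have hjne : j + 1 < str.length := by
          rcases Nat.lt_or_ge (j + 1) str.length with hlt | hge
          · exact hlt
          · exfalso
            have hjl : j = str.length - 1 := by omega
            have hg := lastIdx_get M str j hj
            apply hlastne
            rw [List.getLast?_eq_getElem?, ← hjl, List.getElem?_eq_getElem hjlt]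
            have : str[j] = str.getD j [] := by
              simp [List.getD_eq_getElem?_getD, List.getElem?_eq_getElem hjlt]
            rw [this, hg]
        rw [hj] at hfl
        simp only [Option.map_some] at hfl
        simp only [Option.elim, Nat.zero_add]
        have hjlines : j + 1 < lines.length := by omega
        rw [if_neg (show ¬(((j : Nat) : Int) < 0 ∨ (lines.length : Int) ≤ ((j : Nat) : Int) + 1) by omega)]
        have hcast : ((j : Nat) : Int) + 1 = ((j + 1 : Nat) : Int) := by omega

        rw [hcast, PySem.List.pyGet?_natCast]
        rw [List.getElem?_eq_getElem hjlines]
        have hiso : PySem.Chars.strip lines[j + 1] = str.getD (j + 1) [] := by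
          simp [hstr, List.getD_eq_getElem?_getD, List.getElem?_eq_getElem hjlines]
        have hfne : (((str.zip str.tail).filter (fun p => p.1 == M)).map Prod.snd) ≠ [] := by
          intro hc; rw [hc] at hfl; simp at hfl
        have hie : (((str.zip str.tail).filter (fun p => p.1 == M)).map Prod.snd).isEmpty = false := by
          simpa [List.isEmpty_iff] using hfne
        rw [hfl, hie]
        simp [hiso, List.getD_eq_getElem?_getD]

-- ===== VERDICT (by name: the statement is the Claim_ definition above) =====
theorem is_secure_answer_spec : Claim_equal_is_secure_answer := by
  intro answer_text _
  simp only [Spec_is_secure_answer, is_secure_answer, is_secure_answer_alt]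
  have h : (PySem.Chars.splitOn answer_text.toList ['\n']).map
      (fun ln => PySem.Chars.strip (PySem.Chars.replace ln ['\r'] [])) =
    ((PySem.Chars.splitOn answer_text.toList ['\n']).map
      (fun ln => PySem.Chars.replace ln ['\r'] [])).map PySem.Chars.strip := by
    simp [List.map_map, Function.comp]
  rw [h]
  exact core_eq _ _ (by decide) _
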